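-- pv_equiv track=rewrite | github.com/haulmin/text | README.py | goodString
-- ===== SOURCE A (Python) =====
-- def goodString(string: str): # convert string into number, base is 0
--   count = 0; passCount = 0
--   arr = []
--
--   for i in range(len(string)):
--     if passCount > 0:
--       passCount -= 1
--       continue
--
--     else:
--       if string[i] == 'a':
--         count += 1
--       else:
--         arr.append(count-1)
--         passCount = count-1
--         count = 0
--
--   return arr
-- ===== SOURCE B (Python) =====
-- def goodString(string: str):
--     # Two staged passes. Pass 1 (backwards): r[i] = length of the run of 'a's
--     # starting at i. Pass 2: jump from segment to segment using r, emitting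
--     # run-length minus one and stepping the index past the skipped region.
--     n = len(string)
--     r = [0] * (n + 1)
--     for i in range(n - 1, -1, -1):
--         r[i] = r[i + 1] + 1 if string[i] == 'a' else 0
--     arr = []
--     i = 0
--     while i < n:
--         k = r[i]
--         if i + k == n:
--             break
--         arr.append(k - 1)
--         i += k + 1 + max(k - 1, 0)
--     return arr
-- ===== Notes on version B (the rewrite author's own statement) =====
-- stated objective: alternative
-- what changed: Replaces the single forward pass with mutable count/passCount skip-counter state by two staged passes: a backward pass precomputing a run-length table r (r[i] = length of the 'a'-run starting at i), then an index-jumping scan over r that emits k-1 per segment and steps straight past the skipped region, with no per-character state.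
import Mathlib
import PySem

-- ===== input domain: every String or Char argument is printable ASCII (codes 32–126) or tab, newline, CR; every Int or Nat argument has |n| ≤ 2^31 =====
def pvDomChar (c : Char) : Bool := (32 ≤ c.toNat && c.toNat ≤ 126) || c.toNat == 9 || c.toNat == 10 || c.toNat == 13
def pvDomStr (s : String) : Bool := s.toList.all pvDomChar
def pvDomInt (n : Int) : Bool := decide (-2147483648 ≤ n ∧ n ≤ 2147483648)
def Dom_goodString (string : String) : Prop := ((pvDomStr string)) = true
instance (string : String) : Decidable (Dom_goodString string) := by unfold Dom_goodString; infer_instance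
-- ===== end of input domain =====

-- B replaces A's per-character skip-counter loop by two staged passes: a backward
-- run-length table plus an index-jumping scan over it.

-- ===== PORT A =====
-- A iterates i over range(len(string)) reading string[i]; ported as a fold over the
-- characters in order with the same (count, passCount, arr) state.
def pvStepA (s : Int × Int × List Int) (c : Char) : Int × Int × List Int :=
  match s with
  | (count, passCount, arr) =>
    if passCount > 0 then (count, passCount - 1, arr)
    else if c == 'a' then (count + 1, passCount, arr)
    else (0, count - 1, arr ++ [count - 1])

def goodString (string : String) : List Int :=
  (string.toList.foldl pvStepA (0, 0, [])).2.2

-- ===== PORT B =====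
-- Source B's backward pass filling r[i] from r[i+1]: built right-to-left over the
-- characters, with the trailing sentinel 0 (r has length n+1).
def pvRuns (cs : List Char) : List Nat :=
  match cs with
  | [] => [0]
  | c :: rest =>
    let r := pvRuns rest
    (if c == 'a' then r.head! + 1 else 0) :: r

-- Source B's `while i < n` jump loop; i strictly increases, so it terminates on n - i.
def pvJump (n : Nat) (r : List Nat) (i : Nat) : List Int :=
  if _h : i < n then
    let k := r.getD i 0
    if i + k = n then []
    else ((k : Int) - 1) :: pvJump n r (i + k + 1 + ((k : Int) - 1).toNat)
  else []
termination_by n - i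

def goodString_alt (string : String) : List Int :=
  pvJump string.toList.length (pvRuns string.toList) 0

-- ===== PRECONDITION & SPEC =====
def Spec_goodString (string : String) (out : List Int) : Prop := out = goodString_alt string
instance (string : String) (out : List Int) : Decidable (Spec_goodString string out) := by unfold Spec_goodString; infer_instance

-- ===== CLAIM (what is proved, stated in full; the proofs are below) =====
def Claim_equal_goodString : Prop := ∀ (string : String), Dom_goodString string → Spec_goodString string (goodString string)

-- ===== LEMMAS AND PROOFS =====

-- Skipping: a positive passCount n just discards the next n characters.
theorem pv_skip (n : Nat) (cs : List Char) (count : Int) (arr : List Int) :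
    (List.foldl pvStepA (count, (n : Int), arr) cs).2.2
      = (List.foldl pvStepA (count, 0, arr) (cs.drop n)).2.2 := by
  induction cs generalizing n with
  | nil => simp
  | cons c rest ih =>
    cases n with
    | zero => simp
    | succ m =>
      have h1 : pvStepA (count, ((m + 1 : Nat) : Int), arr) c = (count, (m : Int), arr) := by
        simp only [pvStepA, if_pos (by positivity : ((m + 1 : Nat) : Int) > 0)]
        norm_num
      simp only [List.foldl_cons, h1, List.drop_succ_cons]
      exact ih m

-- Folding A's step over a run of 'a's just increments count by the run length.
theorem pv_run (as : List Char) (hall : ∀ c ∈ as, c = 'a') (count p : Int) (arr : List Int)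
    (hp : p ≤ 0) :
    List.foldl pvStepA (count, p, arr) as = (count + as.length, p, arr) := by
  induction as generalizing count with
  | nil => simp
  | cons c rest ih =>
    have hc : c = 'a' := hall c (by simp)
    have hnp : ¬ p > 0 := by omega
    simp only [List.foldl_cons, pvStepA, if_neg hnp, hc, beq_self_eq_true, if_true]
    rw [ih (fun c hc => hall c (by simp [hc])) (count + 1)]
    refine congrArg (fun z => (z, p, arr)) ?_
    simp only [List.length_cons]
    push_cast
    ring

theorem pv_runs_ne_nil (cs : List Char) : pvRuns cs ≠ [] := by
  cases cs <;> simp [pvRuns]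

-- The table entry at i is the length of the 'a'-run starting at position i.
theorem pv_runs_getD (cs : List Char) : ∀ i : Nat,
    (pvRuns cs).getD i 0 = ((cs.drop i).takeWhile (· == 'a')).length := by
  induction cs with
  | nil => intro i; cases i <;> simp [pvRuns]
  | cons c rest ih =>
    intro i
    cases i with
    | zero =>
      have hh : (pvRuns rest).head! = (pvRuns rest).getD 0 0 := by
        rcases he : pvRuns rest with _ | ⟨x, r⟩
        · exact absurd he (pv_runs_ne_nil rest)
        · simp
      by_cases hc : (c == 'a') = true
      · simp only [pvRuns, if_pos hc, List.getD_cons_zero, hh, ih 0, List.drop_zero]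
        simp [hc]
      · simp only [pvRuns, if_neg hc, List.getD_cons_zero, List.drop_zero]
        simp [hc]
    | succ j =>
      simp only [pvRuns, List.getD_cons_succ, List.drop_succ_cons]
      exact ih j

-- Main invariant: A's fold over the suffix cs.drop i produces arr ++ B's jump loop from i.
theorem pv_main (cs : List Char) (f : Nat) : ∀ i : Nat, cs.length - i ≤ f →
    ∀ (p : Int) (arr : List Int), p ≤ 0 →
    (List.foldl pvStepA (0, p, arr) (cs.drop i)).2.2
      = arr ++ pvJump cs.length (pvRuns cs) i := by
  induction f with
  | zero =>
    intro i hf p arr hp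
    have hge : ¬ i < cs.length := by omega
    rw [List.drop_eq_nil_of_le (by omega), pvJump, dif_neg hge]
    simp
  | succ m ih =>
    intro i hf p arr hp
    by_cases hlt : i < cs.length
    · have hk := pv_runs_getD cs i
      obtain ⟨as, stripped, has, hst⟩ :
          ∃ as stripped, as = (cs.drop i).takeWhile (· == 'a')
            ∧ stripped = (cs.drop i).dropWhile (· == 'a') := ⟨_, _, rfl, rfl⟩
      have hdec : cs.drop i = as ++ stripped := by
        rw [has, hst]; exact (List.takeWhile_append_dropWhile ..).symm
      have hall : ∀ c ∈ as, c = 'a' := by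
        intro c hc; rw [has] at hc; simpa using List.mem_takeWhile_imp hc
      have hlen2 : as.length + stripped.length = cs.length - i := by
        have : (cs.drop i).length = cs.length - i := List.length_drop ..
        rw [← this, hdec, List.length_append]
      rw [← has] at hk
      have hfold : (List.foldl pvStepA (0, p, arr) (cs.drop i)).2.2
          = (List.foldl pvStepA ((as.length : Int), p, arr) stripped).2.2 := by
        rw [hdec, List.foldl_append, pv_run as hall 0 p arr hp]
        norm_num
      rw [pvJump, dif_pos hlt, hk]
      by_cases hend : i + as.length = cs.length
      · -- the run reaches the end of the string: A only counts, B breaks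
        have hsnil : stripped = [] := by
          have : stripped.length = 0 := by omega
          exact List.eq_nil_of_length_eq_zero this
        rw [if_pos hend, hfold, hsnil]
        simp
      · rw [if_neg hend]
        have hsne : stripped ≠ [] := by
          intro h; rw [h] at hlen2; simp at hlen2; omega
        rcases hse : stripped with _ | ⟨c, rest⟩
        · exact absurd hse hsne
        have h0 : (cs.drop i).dropWhile (· == 'a') = c :: rest := by rw [← hst, hse]
        have hcne : ¬ (c == 'a') = true := by
          have := List.head_dropWhile_not (· == 'a') (l := cs.drop i) (by rw [h0]; simp)
          simp [h0] at this
          simp [this]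
        have hnp : ¬ p > 0 := by omega
        rw [hfold, hse]
        simp only [List.foldl_cons, pvStepA, if_neg hnp, hcne, Bool.false_eq_true, if_false]
        rcases Nat.eq_zero_or_pos as.length with hz | hpos
        · -- run length 0: A's passCount becomes -1 (no skip), B steps i by 1
          have hanil : as = [] := List.eq_nil_of_length_eq_zero hz
          rw [hz]
          simp only [Nat.cast_zero]
          have hrest : cs.drop (i + 1) = rest := by
            rw [← List.drop_drop, hdec, hanil, hse]
            simp
          have := ih (i + 1) (by omega) (0 - 1) (arr ++ [(0 : Int) - 1]) (by omega)
          rw [hrest] at this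
          rw [this]
          have h01 : ((0 : Int) - 1).toNat = 0 := rfl
          rw [h01]
          simp
        · -- run length k ≥ 1: A skips k-1 characters, B steps i by 2k
          have hm2 : ((as.length : Int) - 1) = ((as.length - 1 : Nat) : Int) := by omega
          have hdrop : cs.drop (i + (as.length + 1 + (as.length - 1)))
              = rest.drop (as.length - 1) := by
            rw [← List.drop_drop, hdec, hse]
            have h2 : as.length + 1 + (as.length - 1) = as.length + (1 + (as.length - 1)) := by
              omega
            rw [h2, List.drop_append]
            have h4 : as.length + (1 + (as.length - 1)) - as.length
                = (as.length - 1) + 1 := by omega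
            rw [List.drop_eq_nil_of_le (by omega), h4, List.drop_succ_cons]
            simp
          rw [hm2, pv_skip (as.length - 1) rest 0 (arr ++ [((as.length - 1 : Nat) : Int)])]
          have := ih (i + (as.length + 1 + (as.length - 1))) (by omega) 0
            (arr ++ [((as.length - 1 : Nat) : Int)]) le_rfl
          rw [hdrop] at this
          rw [this]
          have hix : i + as.length + 1 + (((as.length - 1 : Nat) : Int)).toNat
              = i + (as.length + 1 + (as.length - 1)) := by omega
          rw [hix]
          simp
    · rw [List.drop_eq_nil_of_le (by omega), pvJump, dif_neg hlt]
      simp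

-- ===== VERDICT (by name: the statement is the Claim_ definition above) =====
theorem goodString_spec : Claim_equal_goodString := by
  intro s _
  show (s.toList.foldl pvStepA (0, 0, [])).2.2 = goodString_alt s
  have := pv_main s.toList s.toList.length 0 (by omega) 0 [] le_rfl
  rw [List.drop_zero] at this
  exact this
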